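-- pv_equiv track=rewrite | github.com/August-jhn/coxeter | ComputeCosets.py | compute_words
-- ===== SOURCE A (Python) =====
-- def compute_words(graphs,indices,generators, shorten = True):
--     """this function takes the graphs and creates a dictionary of indices to letters"""
--     indices_to_letters = {}
--     indices_to_letters[1] = "1"
--
--     def trace_graph(i, word):
--
--         que = {}
--         for g in generators:
--
--             que[graphs[g][i]] = g
--
--         for q in que:
--             if q not in indices_to_letters:
--                 indices_to_letters[q] =  que[q] + word
--                 trace_graph(q,  que[q] + word)
--     trace_graph(indices[0], "")
--     return indices_to_letters
-- ===== SOURCE B (Python) =====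
-- def compute_words(graphs, indices, generators, shorten=True):
--     """Iterative DFS: explicit stack, a visited set and an output list of pairs
--     (assembled into the result dict at the end) instead of A's recursion
--     mutating an enclosing dict."""
--     visited = {1}
--     out = [(1, "1")]
--
--     def neighbors(i, word):
--         que = {}
--         for g in generators:
--             que[graphs[g][i]] = g
--         return [(q, g + word) for q, g in reversed(list(que.items()))]
--
--     stack = neighbors(indices[0], "")
--     while stack:
--         q, word = stack.pop()
--         if q not in visited:
--             visited.add(q)
--             out.append((q, word))
--             stack.extend(neighbors(q, word))
--     return dict(out)
-- ===== Notes on version B (the rewrite author's own statement) =====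
-- stated objective: alternative
-- what changed: Replaces A's recursive DFS (nested closure mutating an enclosing dict) by an iterative stack-based DFS that keeps a visited set and an output list of pairs (pop-time visited check, children pushed in reverse que order) and builds the result dict once at the end.
import Mathlib
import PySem

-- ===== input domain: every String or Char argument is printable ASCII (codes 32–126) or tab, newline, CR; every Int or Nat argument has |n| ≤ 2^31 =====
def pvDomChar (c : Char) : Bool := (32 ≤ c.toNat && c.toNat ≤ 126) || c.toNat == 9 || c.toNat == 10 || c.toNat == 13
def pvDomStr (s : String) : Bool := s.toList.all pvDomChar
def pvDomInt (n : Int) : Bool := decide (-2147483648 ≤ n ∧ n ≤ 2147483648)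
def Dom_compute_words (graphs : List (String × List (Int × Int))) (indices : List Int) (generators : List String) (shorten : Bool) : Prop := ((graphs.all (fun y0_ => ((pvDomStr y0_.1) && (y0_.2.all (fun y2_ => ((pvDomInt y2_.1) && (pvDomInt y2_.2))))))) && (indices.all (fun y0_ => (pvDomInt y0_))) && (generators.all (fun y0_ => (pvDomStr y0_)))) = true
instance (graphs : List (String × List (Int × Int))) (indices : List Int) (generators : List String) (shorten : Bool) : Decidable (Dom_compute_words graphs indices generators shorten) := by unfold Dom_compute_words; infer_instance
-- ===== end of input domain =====

-- B replaces A's recursive DFS (nested closure mutating an enclosing dict) by an iterative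
-- stack-based DFS keeping a visited set and an output list of pairs, assembling the result
-- dict once at the end; objective: alternative (same asymptotic cost).

-- shared sub-step of both Pythons: the literal loop `que = {}; for g in generators: que[graphs[g][i]] = g`
-- (a failed lookup — where Python raises KeyError — skips the insert; Pre_ excludes those inputs)
def pvQue (graphs : List (String × List (Int × Int))) (generators : List String) (i : Int) : PySem.Dict Int String :=
  generators.foldl (fun que g =>
    match (PySem.Dict.mk graphs).get? g with
    | none => que
    | some d =>
      match (PySem.Dict.mk d).get? i with
      | none => que
      | some q => que.insert q g) PySem.Dict.empty

-- termination bookkeeping for the DFS: the universe of possible new keys, and how many are unvisited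
def pvVals (graphs : List (String × List (Int × Int))) : List Int :=
  (graphs.map (fun p => p.2.map (fun e => e.2))).flatten

def pvCount (graphs : List (String × List (Int × Int))) (D : PySem.Dict Int String) : Nat :=
  (pvVals graphs).countP (fun v => !(D.contains v))

def pvMono (D D' : PySem.Dict Int String) : Prop :=
  ∀ k, D.contains k = true → D'.contains k = true

theorem pvMono_refl (D : PySem.Dict Int String) : pvMono D D := fun _ h => h

theorem pvMono_trans {D₁ D₂ D₃ : PySem.Dict Int String} (h₁ : pvMono D₁ D₂) (h₂ : pvMono D₂ D₃) :
    pvMono D₁ D₃ := fun k h => h₂ k (h₁ k h)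

theorem pvMono_insert (D : PySem.Dict Int String) (q : Int) (w : String) : pvMono D (D.insert q w) := by
  intro k h
  simp [PySem.Dict.contains_insert, h]

theorem pvCount_le_of_mono {gs : List (String × List (Int × Int))} {D D' : PySem.Dict Int String}
    (h : pvMono D D') : pvCount gs D' ≤ pvCount gs D := by
  apply List.countP_mono_left
  intro a _ ha
  cases hc : D.contains a with
  | true => exact absurd (h a hc) (by simpa using ha)
  | false => simp [hc]

theorem pv_countP_lt {α : Type} (l : List α) (p q : α → Bool) (hpq : ∀ a, p a = true → q a = true)
    (a0 : α) (h0 : a0 ∈ l) (hqa : q a0 = true) (hpa : p a0 = false) :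
    l.countP p < l.countP q := by
  induction l with
  | nil => cases h0
  | cons b l ih =>
    rcases List.mem_cons.1 h0 with hb | hb
    · subst hb
      have hle : l.countP p ≤ l.countP q :=
        List.countP_mono_left (fun a _ => hpq a)
      rw [List.countP_cons, List.countP_cons]
      simp [hqa, hpa]
      omega
    · have := ih hb
      have hstep : (if p b = true then 1 else 0) ≤ (if q b = true then 1 else 0) := by
        by_cases h : p b = true
        · simp [h, hpq b h]
        · simp [h]
      simp only [List.countP_cons]
      omega

theorem pvCount_insert_lt {gs : List (String × List (Int × Int))} {D : PySem.Dict Int String}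
    {q : Int} (w : String) (hq : q ∈ pvVals gs) (h : D.contains q = false) :
    pvCount gs (D.insert q w) < pvCount gs D := by
  refine pv_countP_lt _ _ _ ?_ q hq ?_ ?_
  · intro a ha
    cases hc : D.contains a with
    | true => simp [pvMono_insert D q w a hc] at ha
    | false => simp [hc]
  · simp [h]
  · simp [PySem.Dict.contains_insert_self]

theorem pv_get?_mk_mem_values {κ ν : Type} [BEq κ] (l : List (κ × ν)) (k : κ) (v : ν)
    (h : (PySem.Dict.mk l).get? k = some v) : v ∈ l.map (fun e => e.2) := by
  induction l with
  | nil => simp [PySem.Dict.get?] at h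
  | cons p l ih =>
    rw [show PySem.Dict.mk (p :: l) = PySem.Dict.mk ((p.1, p.2) :: l) from rfl,
      PySem.Dict.get?_mk_cons] at h
    by_cases hk : (p.1 == k) = true
    · simp [hk] at h
      simp [h]
    · simp [hk] at h
      simp [ih h]

theorem pvQue_inv (gs : List (String × List (Int × Int))) (gens : List String) (i : Int) :
    (∀ k ∈ (pvQue gs gens i).keys, k ∈ pvVals gs) ∧ (pvQue gs gens i).keys.Nodup ∧
      (pvQue gs gens i).keys.length ≤ gens.length := by
  have aux : ∀ (gens : List String) (que : PySem.Dict Int String),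
      (∀ k ∈ que.keys, k ∈ pvVals gs) → que.keys.Nodup →
      (∀ k ∈ (gens.foldl (fun que g =>
        match (PySem.Dict.mk gs).get? g with
        | none => que
        | some d =>
          match (PySem.Dict.mk d).get? i with
          | none => que
          | some q => que.insert q g) que).keys, k ∈ pvVals gs) ∧
      (gens.foldl (fun que g =>
        match (PySem.Dict.mk gs).get? g with
        | none => que
        | some d =>
          match (PySem.Dict.mk d).get? i with
          | none => que
          | some q => que.insert q g) que).keys.Nodup ∧
      (gens.foldl (fun que g =>
        match (PySem.Dict.mk gs).get? g with
        | none => que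
        | some d =>
          match (PySem.Dict.mk d).get? i with
          | none => que
          | some q => que.insert q g) que).keys.length ≤ que.keys.length + gens.length := by
    intro gens
    induction gens with
    | nil => intro que h1 h2; exact ⟨h1, h2, by simp⟩
    | cons g gens ih =>
      intro que h1 h2
      simp only [List.foldl_cons]
      rcases hg : (PySem.Dict.mk gs).get? g with _ | d
      · have := ih que h1 h2
        simp only [hg]
        exact ⟨this.1, this.2.1, by simp only [List.length_cons]; omega⟩
      · rcases hd : (PySem.Dict.mk d).get? i with _ | q
        · have := ih que h1 h2
          simp only [hg, hd]
          exact ⟨this.1, this.2.1, by simp only [List.length_cons]; omega⟩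
        · have hqv : q ∈ pvVals gs := by
            have hd' : d ∈ gs.map (fun e => e.2) := pv_get?_mk_mem_values gs g d hg
            have hq' : q ∈ d.map (fun e => e.2) := pv_get?_mk_mem_values d i q hd
            rcases List.mem_map.1 hd' with ⟨p, hp, rfl⟩
            exact List.mem_flatten.2 ⟨p.2.map (fun e => e.2), List.mem_map.2 ⟨p, hp, rfl⟩, hq'⟩
          have h1' : ∀ k ∈ (que.insert q g).keys, k ∈ pvVals gs := by
            intro k hk
            rcases (PySem.Dict.mem_keys_insert _ _ _ _).1 hk with rfl | hk
            · exact hqv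
            · exact h1 k hk
          have h2' : (que.insert q g).keys.Nodup := PySem.Dict.nodup_keys_insert que q g h2
          have hlen : (que.insert q g).keys.length ≤ que.keys.length + 1 := by
            cases hc : que.contains q with
            | true => rw [PySem.Dict.keys_insert_of_contains _ _ hc]; omega
            | false => rw [PySem.Dict.keys_insert_of_not_contains _ _ hc]; simp
          have := ih (que.insert q g) h1' h2'
          simp only [hg, hd]
          exact ⟨this.1, this.2.1, by simp only [List.length_cons] at *; omega⟩
  have h0 := aux gens PySem.Dict.empty (by simp [PySem.Dict.keys_empty]) (by simp [PySem.Dict.keys_empty])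
  exact ⟨h0.1, h0.2.1, by simpa [pvQue, PySem.Dict.keys_empty] using h0.2.2⟩

theorem pvQue_keys_sub (gs : List (String × List (Int × Int))) (gens : List String) (i : Int) :
    ∀ k ∈ (pvQue gs gens i).keys, k ∈ pvVals gs := (pvQue_inv gs gens i).1

theorem pvQue_size (gs : List (String × List (Int × Int))) (gens : List String) (i : Int) :
    (pvQue gs gens i).keys.length ≤ gens.length := (pvQue_inv gs gens i).2.2

-- ===== PORT A =====
-- A's inner `trace_graph` / its `for q in que:` loop, returning the grown dictionary together
-- with the monotonicity fact the termination argument needs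
mutual
def pvTraceA (gs : List (String × List (Int × Int))) (gens : List String)
    (D : PySem.Dict Int String) (i : Int) (word : String) :
    {D' : PySem.Dict Int String // pvMono D D'} :=
  pvLoopA gs gens D (pvQue gs gens i) (pvQue gs gens i).keys word
    (fun k hk => pvQue_keys_sub gs gens i k hk)
termination_by (pvCount gs D, gens.length + 1)
decreasing_by
  exact Prod.Lex.right _ (Nat.lt_succ_of_le (pvQue_size gs gens i))

def pvLoopA (gs : List (String × List (Int × Int))) (gens : List String)
    (D : PySem.Dict Int String) (que : PySem.Dict Int String) (ks : List Int) (word : String)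
    (hq : ∀ k ∈ ks, k ∈ pvVals gs) :
    {D' : PySem.Dict Int String // pvMono D D'} :=
  match ks with
  | [] => ⟨D, pvMono_refl D⟩
  | q :: ks' =>
    if h : D.contains q = true then
      pvLoopA gs gens D que ks' word (fun k hk => hq k (List.mem_cons_of_mem _ hk))
    else
      -- que[q] + word (q is a key of que, so getD finds it)
      let w' := que.getD q "" ++ word
      let r1 := pvTraceA gs gens (D.insert q w') q w'
      let r2 := pvLoopA gs gens r1.val que ks' word (fun k hk => hq k (List.mem_cons_of_mem _ hk))
      ⟨r2.val, pvMono_trans (pvMono_trans (pvMono_insert D q w') r1.property) r2.property⟩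
termination_by (pvCount gs D, ks.length)
decreasing_by
  · exact Prod.Lex.right _ (Nat.lt_succ_self _)
  · exact Prod.Lex.left _ _ (pvCount_insert_lt _ (hq q (List.mem_cons_self)) (by simpa using h))
  · exact Prod.Lex.left _ _
      (Nat.lt_of_le_of_lt (pvCount_le_of_mono r1.property)
        (pvCount_insert_lt _ (hq q (List.mem_cons_self)) (by simpa using h)))
end

def compute_words (graphs : List (String × List (Int × Int))) (indices : List Int)
    (generators : List String) (shorten : Bool) : List (Int × String) :=
  let D0 := (PySem.Dict.empty : PySem.Dict Int String).insert 1 "1"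
  match PySem.List.pyGet? indices 0 with
  | none => D0.items   -- indices[0] raises IndexError in Python; Pre_ excludes this
  | some i0 => (pvTraceA graphs generators D0 i0 "").val.items

-- ===== PORT B =====
-- Source B pushes reversed(list(que.items())) (word appended) and pops from the END of the list;
-- modelling the stack head-as-top, that is prepending que's items in their own order
def pvNbrs (gs : List (String × List (Int × Int))) (gens : List String) (i : Int) (w : String) :
    List (Int × String) :=
  (pvQue gs gens i).items.map (fun p => (p.1, p.2 ++ w))

theorem pvNbrs_sub (gs : List (String × List (Int × Int))) (gens : List String) (i : Int)
    (w : String) : ∀ p ∈ pvNbrs gs gens i w, p.1 ∈ pvVals gs := by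
  intro p hp
  rcases List.mem_map.1 hp with ⟨e, he, rfl⟩
  exact pvQue_keys_sub gs gens i e.1 (List.mem_map.2 ⟨e, he, rfl⟩)

-- how many of the possible keys the visited SET does not yet hold (termination of B's loop)
def pvCountS (graphs : List (String × List (Int × Int))) (V : PySem.Set Int) : Nat :=
  (pvVals graphs).countP (fun v => !(PySem.Set.contains V v))

theorem pvCountS_add_lt {gs : List (String × List (Int × Int))} {V : PySem.Set Int} {q : Int}
    (hq : q ∈ pvVals gs) (h : PySem.Set.contains V q = false) :
    pvCountS gs (PySem.Set.add V q) < pvCountS gs V := by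
  refine pv_countP_lt _ _ _ ?_ q hq ?_ ?_
  · intro a ha
    cases hc : PySem.Set.contains V a with
    | true =>
      have hm : a ∈ PySem.Set.add V q :=
        (PySem.Set.mem_add _ _ _).2 (Or.inl ((PySem.Set.contains_iff _ _).1 hc))
      rw [(PySem.Set.contains_iff _ _).2 hm] at ha
      cases ha
    | false => simp [hc]
  · rw [h]; rfl
  · have hm : q ∈ PySem.Set.add V q := (PySem.Set.mem_add _ _ _).2 (Or.inr rfl)
    rw [(PySem.Set.contains_iff _ _).2 hm]; rfl

-- the `while stack:` loop of B: visited set V, output list out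
def pvRunB (gs : List (String × List (Int × Int))) (gens : List String)
    (V : PySem.Set Int) (out : List (Int × String)) (stack : List (Int × String))
    (hs : ∀ p ∈ stack, p.1 ∈ pvVals gs) : List (Int × String) :=
  match stack with
  | [] => out
  | (q, w) :: rest =>
    if h : PySem.Set.contains V q = true then
      pvRunB gs gens V out rest (fun p hp => hs p (List.mem_cons_of_mem _ hp))
    else
      pvRunB gs gens (PySem.Set.add V q) (out ++ [(q, w)]) (pvNbrs gs gens q w ++ rest)
        (fun p hp => by
          rcases List.mem_append.1 hp with hp | hp
          · exact pvNbrs_sub gs gens q w p hp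
          · exact hs p (List.mem_cons_of_mem _ hp))
termination_by (pvCountS gs V, stack.length)
decreasing_by
  · exact Prod.Lex.right _ (Nat.lt_succ_self _)
  · exact Prod.Lex.left _ _ (pvCountS_add_lt (hs (q, w) (List.mem_cons_self)) (by simpa using h))

def compute_words_alt (graphs : List (String × List (Int × Int))) (indices : List Int)
    (generators : List String) (shorten : Bool) : List (Int × String) :=
  match PySem.List.pyGet? indices 0 with
  | none => [((1 : Int), "1")]   -- indices[0] raises IndexError in Python; Pre_ excludes this
  | some i0 =>
      pvRunB graphs generators (PySem.Set.ofList [1]) [((1 : Int), "1")]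
        (pvNbrs graphs generators i0 "")
        (fun p hp => pvNbrs_sub graphs generators i0 "" p hp)

-- ===== PRECONDITION & SPEC =====
-- Python A raises exactly when indices is empty (IndexError) or the DFS looks up a missing key
-- (KeyError).  The nodes the DFS looks up are precisely those reachable from indices[0] along
-- graph edges without passing through the pre-visited node 1 — a graph-theoretic closure over
-- the input (no words, no dictionary, no traversal order), computed by saturating the edge
-- relation over the finite node universe.

-- `i` is safe to expand: every generator is a key of graphs and its graph has key i
def pvTotal (graphs : List (String × List (Int × Int))) (generators : List String) (i : Int) : Bool :=
  generators.all (fun g =>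
    match (PySem.Dict.mk graphs).get? g with
    | none => false
    | some d => ((PySem.Dict.mk d).get? i).isSome)

-- edges out of i (successors ≠ 1, which is pre-visited and never expanded)
def pvSucc (graphs : List (String × List (Int × Int))) (generators : List String) (i : Int) : List Int :=
  (generators.filterMap (fun g =>
    ((PySem.Dict.mk graphs).get? g).bind (fun d => (PySem.Dict.mk d).get? i))).filter (fun q => !(q == 1))

-- one saturation step of the reachable set (only safe nodes contribute edges)
def pvStepR (graphs : List (String × List (Int × Int))) (generators : List String)
    (S : PySem.Set Int) : PySem.Set Int :=
  PySem.Set.update S ((S.filter (fun i => pvTotal graphs generators i)).flatMap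
    (fun i => pvSucc graphs generators i))

-- the reachable set: saturating |pvVals graphs| + 1 times reaches the fixpoint
def pvReach (graphs : List (String × List (Int × Int))) (generators : List String) (i0 : Int) :
    PySem.Set Int :=
  (pvStepR graphs generators)^[(pvVals graphs).length + 1] (PySem.Set.ofList [i0])

-- Pre_ = exactly the inputs where Python A returns: indices nonempty, and every node reachable
-- from indices[0] (not through node 1) has all its generator lookups defined
def Pre_compute_words (graphs : List (String × List (Int × Int))) (indices : List Int)
    (generators : List String) (shorten : Bool) : Prop :=
  indices ≠ [] ∧
    ∀ i ∈ pvReach graphs generators (indices.headD 0), pvTotal graphs generators i = true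

instance (graphs : List (String × List (Int × Int))) (indices : List Int) (generators : List String) (shorten : Bool) : Decidable (Pre_compute_words graphs indices generators shorten) := by unfold Pre_compute_words; infer_instance

def pvWitness_compute_words : (List (String × List (Int × Int))) × List Int × List String × Bool :=
  ([("a", [(0, 2), (2, 1), (1, 0)])], [0], ["a"], true)

def Spec_compute_words (graphs : List (String × List (Int × Int))) (indices : List Int) (generators : List String) (shorten : Bool) (out : List (Int × String)) : Prop := out = compute_words_alt graphs indices generators shorten
instance (graphs : List (String × List (Int × Int))) (indices : List Int) (generators : List String) (shorten : Bool) (out : List (Int × String)) : Decidable (Spec_compute_words graphs indices generators shorten out) := by unfold Spec_compute_words; infer_instance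

-- ===== CLAIM (what is proved, stated in full; the proofs are below) =====
def Claim_equal_compute_words : Prop := ∀ (graphs : List (String × List (Int × Int))) (indices : List Int) (generators : List String) (shorten : Bool), Dom_compute_words graphs indices generators shorten → Pre_compute_words graphs indices generators shorten → Spec_compute_words graphs indices generators shorten (compute_words graphs indices generators shorten)

-- ===== LEMMAS AND PROOFS =====

theorem pvQue_nodup (gs : List (String × List (Int × Int))) (gens : List String) (i : Int) :
    (pvQue gs gens i).keys.Nodup := (pvQue_inv gs gens i).2.1

-- proof-only intermediate: B's loop re-expressed on the dictionary A maintains (the simulation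
-- lemma pvRunB_sim identifies it with pvRunB; the schedule lemma pvMain identifies it with A)
def pvRunD (gs : List (String × List (Int × Int))) (gens : List String)
    (D : PySem.Dict Int String) (stack : List (Int × String))
    (hs : ∀ p ∈ stack, p.1 ∈ pvVals gs) : PySem.Dict Int String :=
  match stack with
  | [] => D
  | (q, w) :: rest =>
    if h : D.contains q = true then
      pvRunD gs gens D rest (fun p hp => hs p (List.mem_cons_of_mem _ hp))
    else
      pvRunD gs gens (D.insert q w) (pvNbrs gs gens q w ++ rest)
        (fun p hp => by
          rcases List.mem_append.1 hp with hp | hp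
          · exact pvNbrs_sub gs gens q w p hp
          · exact hs p (List.mem_cons_of_mem _ hp))
termination_by (pvCount gs D, stack.length)
decreasing_by
  · exact Prod.Lex.right _ (Nat.lt_succ_self _)
  · exact Prod.Lex.left _ _ (pvCount_insert_lt _ (hs (q, w) (List.mem_cons_self)) (by simpa using h))

-- B's (visited set, output list) state simulates the dictionary state
theorem pvRunB_sim (gs : List (String × List (Int × Int))) (gens : List String)
    (stack : List (Int × String)) (hs : ∀ p ∈ stack, p.1 ∈ pvVals gs)
    (V : PySem.Set Int) (out : List (Int × String)) (D : PySem.Dict Int String)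
    (hV : ∀ k, PySem.Set.contains V k = D.contains k) (hO : out = D.items) :
    pvRunB gs gens V out stack hs = (pvRunD gs gens D stack hs).items := by
  match stack with
  | [] => simp only [pvRunB, pvRunD, hO]
  | (q, w) :: rest =>
    cases hc : D.contains q with
    | true =>
      simp only [pvRunB, pvRunD, hV q, hc, dif_pos]
      exact pvRunB_sim gs gens rest _ V out D hV hO
    | false =>
      simp only [pvRunB, pvRunD, hV q, hc, Bool.false_eq_true, dif_neg, not_false_iff]
      refine pvRunB_sim gs gens _ _ _ _ _ ?_ ?_
      · intro k
        rw [PySem.Dict.contains_insert]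
        by_cases hk : k = q
        · subst hk
          have hm : k ∈ PySem.Set.add V k := (PySem.Set.mem_add _ _ _).2 (Or.inr rfl)
          simp [(PySem.Set.contains_iff _ _).2 hm]
        · have hne : (k == q) = false := by simp [hk]
          rw [hne, Bool.false_or, ← hV k]
          cases hcv : PySem.Set.contains V k with
          | true =>
            have hm : k ∈ PySem.Set.add V q :=
              (PySem.Set.mem_add _ _ _).2 (Or.inl ((PySem.Set.contains_iff _ _).1 hcv))
            rw [(PySem.Set.contains_iff _ _).2 hm]
          | false =>
            cases hca : PySem.Set.contains (PySem.Set.add V q) k with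
            | false => rfl
            | true =>
              rcases (PySem.Set.mem_add _ _ _).1 ((PySem.Set.contains_iff _ _).1 hca) with hm | hm
              · rw [(PySem.Set.contains_iff _ _).2 hm] at hcv; cases hcv
              · exact absurd hm hk
      · rw [PySem.Dict.items_insert_of_not_contains D w hc, hO]
termination_by (pvCount gs D, stack.length)
decreasing_by
  all_goals first
    | exact Prod.Lex.right _ (Nat.lt_succ_self _)
    | exact Prod.Lex.left _ _ (pvCount_insert_lt _ (hs (q, w) (List.mem_cons_self)) hc)

theorem pvLoopA_cons_false (gs : List (String × List (Int × Int))) (gens : List String)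
    (D que : PySem.Dict Int String) (q : Int) (ks' : List Int) (word : String)
    (hq : ∀ k ∈ q :: ks', k ∈ pvVals gs) (hq' : ∀ k ∈ ks', k ∈ pvVals gs)
    (h : D.contains q = false) (g : String) (hgq : que.getD q "" = g) :
    (pvLoopA gs gens D que (q :: ks') word hq).val =
      (pvLoopA gs gens
        (pvLoopA gs gens (D.insert q (g ++ word)) (pvQue gs gens q) (pvQue gs gens q).keys
          (g ++ word) (fun k hk => pvQue_keys_sub gs gens q k hk)).val
        que ks' word hq').val := by
  subst hgq
  rw [pvLoopA]
  simp only [h, Bool.false_eq_true, dif_neg, not_false_iff]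
  rw [pvTraceA.eq_def]

-- the schedule lemma: running B's dictionary-state loop on a stack that starts with one node's
-- que items equals first running A's recursive trace of those items, then the rest of the stack
theorem pvMain (c : Nat) :
    ∀ (gs : List (String × List (Int × Int))) (gens : List String)
      (D que : PySem.Dict Int String) (its : List (Int × String)) (word : String)
      (rest : List (Int × String)) (hc : pvCount gs D ≤ c)
      (hg : ∀ p ∈ its, que.getD p.1 "" = p.2)
      (hq : ∀ k ∈ its.map (fun p => p.1), k ∈ pvVals gs)
      (hs : ∀ p ∈ its.map (fun p => (p.1, p.2 ++ word)) ++ rest, p.1 ∈ pvVals gs)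
      (hr : ∀ p ∈ rest, p.1 ∈ pvVals gs),
      pvRunD gs gens D (its.map (fun p => (p.1, p.2 ++ word)) ++ rest) hs =
        pvRunD gs gens (pvLoopA gs gens D que (its.map (fun p => p.1)) word hq).val rest hr := by
  induction c with
  | zero =>
    intro gs gens D que its word rest hc hg hq hs hr
    induction its with
    | nil =>
      simp only [List.map_nil, List.nil_append, pvLoopA]
    | cons p its ih =>
      cases hcon : D.contains p.1 with
      | true =>
        simp only [List.map_cons, List.cons_append, pvRunD, pvLoopA, hcon, dif_pos]
        exact ih (fun e he => hg e (List.mem_cons_of_mem _ he))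
          (fun k hk => hq k (List.mem_cons_of_mem _ hk))
          (fun e he => hs e (List.mem_cons_of_mem _ he))
      | false =>
        exfalso
        have hp : p.1 ∈ pvVals gs := hq p.1 (by simp)
        have : 0 < pvCount gs D :=
          List.countP_pos_iff.2 ⟨p.1, hp, by simp [hcon]⟩
        omega
  | succ c ihc =>
    intro gs gens D que its word rest hc hg hq hs hr
    induction its with
    | nil =>
      simp only [List.map_nil, List.nil_append, pvLoopA]
    | cons p its ih =>
      cases hcon : D.contains p.1 with
      | true =>
        simp only [List.map_cons, List.cons_append, pvRunD, pvLoopA, hcon, dif_pos]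
        exact ih (fun e he => hg e (List.mem_cons_of_mem _ he))
          (fun k hk => hq k (List.mem_cons_of_mem _ hk))
          (fun e he => hs e (List.mem_cons_of_mem _ he))
      | false =>
        have hw : que.getD p.1 "" = p.2 := hg p (List.mem_cons_self)
        have hp : p.1 ∈ pvVals gs := hq p.1 (by simp)
        have hlt : pvCount gs (D.insert p.1 (p.2 ++ word)) < pvCount gs D :=
          pvCount_insert_lt _ hp hcon
        simp only [List.map_cons, List.cons_append]
        rw [pvRunD]
        simp only [hcon, Bool.false_eq_true, dif_neg, not_false_iff]
        have hqc : ∀ k ∈ p.1 :: its.map (fun p => p.1), k ∈ pvVals gs := by simpa using hq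
        rw [pvLoopA_cons_false gs gens D que p.1 (its.map (fun p => p.1)) word hqc
          (fun k hk => hqc k (List.mem_cons_of_mem _ hk)) hcon p.2 hw]
        -- first IH step: expanding p.1 on the B side equals A's recursive trace
        have h1 := ihc gs gens (D.insert p.1 (p.2 ++ word)) (pvQue gs gens p.1)
          (pvQue gs gens p.1).items (p.2 ++ word) (its.map (fun p => (p.1, p.2 ++ word)) ++ rest)
          (by omega)
          (fun e he => by
            rcases e with ⟨k, v⟩
            exact PySem.Dict.getD_of_mem_items _ he (pvQue_nodup gs gens p.1) "")
          (by
            intro k hk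
            rcases List.mem_map.1 hk with ⟨e, he, rfl⟩
            exact pvQue_keys_sub gs gens p.1 e.1
              (List.mem_map.2 ⟨e, he, rfl⟩))
          (by
            intro e he
            rcases List.mem_append.1 he with he | he
            · rcases List.mem_map.1 he with ⟨e', he', rfl⟩
              exact pvQue_keys_sub gs gens p.1 e'.1 (List.mem_map.2 ⟨e', he', rfl⟩)
            · exact hs e (List.mem_cons_of_mem _ he))
          (by
            intro e he
            rcases List.mem_append.1 he with he | he
            · rcases List.mem_map.1 he with ⟨e', he', rfl⟩
              exact hq e'.1 (List.mem_map.2 ⟨e', List.mem_cons_of_mem _ he', rfl⟩)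
            · exact hr e he)
        -- second IH step: the remaining queue items
        have hmono : pvCount gs (pvLoopA gs gens (D.insert p.1 (p.2 ++ word)) (pvQue gs gens p.1)
            ((pvQue gs gens p.1).items.map (fun p => p.1)) (p.2 ++ word)
            (fun k hk => by
              rcases List.mem_map.1 hk with ⟨e, he, rfl⟩
              exact pvQue_keys_sub gs gens p.1 e.1 (List.mem_map.2 ⟨e, he, rfl⟩))).val ≤ c := by
          have := pvCount_le_of_mono (gs := gs) (pvLoopA gs gens (D.insert p.1 (p.2 ++ word)) (pvQue gs gens p.1)
            ((pvQue gs gens p.1).items.map (fun p => p.1)) (p.2 ++ word)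
            (fun k hk => by
              rcases List.mem_map.1 hk with ⟨e, he, rfl⟩
              exact pvQue_keys_sub gs gens p.1 e.1 (List.mem_map.2 ⟨e, he, rfl⟩))).property
          omega
        have h2 := ihc gs gens (pvLoopA gs gens (D.insert p.1 (p.2 ++ word)) (pvQue gs gens p.1)
            ((pvQue gs gens p.1).items.map (fun p => p.1)) (p.2 ++ word)
            (fun k hk => by
              rcases List.mem_map.1 hk with ⟨e, he, rfl⟩
              exact pvQue_keys_sub gs gens p.1 e.1 (List.mem_map.2 ⟨e, he, rfl⟩))).val
          que its word rest hmono
          (fun e he => hg e (List.mem_cons_of_mem _ he))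
          (fun k hk => hq k (List.mem_cons_of_mem _ hk))
          (fun e he => hs e (List.mem_cons_of_mem _ he)) hr
        exact (h1.trans h2)

theorem pvRunD_congr (gs : List (String × List (Int × Int))) (gens : List String)
    (D : PySem.Dict Int String) (s s' : List (Int × String)) (hss : s = s')
    (h : ∀ p ∈ s, p.1 ∈ pvVals gs) (h' : ∀ p ∈ s', p.1 ∈ pvVals gs) :
    pvRunD gs gens D s h = pvRunD gs gens D s' h' := by subst hss; rfl

theorem pvRunD_nil (gs : List (String × List (Int × Int))) (gens : List String)
    (D : PySem.Dict Int String) (h : ∀ p ∈ ([] : List (Int × String)), p.1 ∈ pvVals gs) :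
    pvRunD gs gens D [] h = D := by
  simp only [pvRunD]

-- ===== VERDICT =====
theorem compute_words_spec : Claim_equal_compute_words := by
  intro gs indices gens shorten hdom hpre
  unfold Spec_compute_words compute_words compute_words_alt
  cases hi : PySem.List.pyGet? indices 0 with
  | none => rfl
  | some i0 =>
    show ((pvTraceA gs gens ((PySem.Dict.empty : PySem.Dict Int String).insert 1 "1") i0 "").val).items =
      pvRunB gs gens (PySem.Set.ofList [1]) [((1 : Int), "1")] (pvNbrs gs gens i0 "")
        (fun p hp => pvNbrs_sub gs gens i0 "" p hp)
    rw [pvRunB_sim gs gens (pvNbrs gs gens i0 "") _ (PySem.Set.ofList [1]) [((1 : Int), "1")]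
      ((PySem.Dict.empty : PySem.Dict Int String).insert 1 "1")
      (by
        intro k
        simp [PySem.Dict.contains_insert, PySem.Dict.contains_empty,
          PySem.Set.contains_eq_listContains]
        rfl)
      rfl]
    congr 1
    rw [pvTraceA.eq_def]
    have hmain := pvMain (pvCount gs ((PySem.Dict.empty : PySem.Dict Int String).insert 1 "1"))
      gs gens ((PySem.Dict.empty : PySem.Dict Int String).insert 1 "1") (pvQue gs gens i0)
      (pvQue gs gens i0).items "" [] le_rfl
      (fun e he => by
        rcases e with ⟨k, v⟩
        exact PySem.Dict.getD_of_mem_items _ he (pvQue_nodup gs gens i0) "")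
      (fun k hk => by
        rcases List.mem_map.1 hk with ⟨e, he, rfl⟩
        exact pvQue_keys_sub gs gens i0 e.1 (List.mem_map.2 ⟨e, he, rfl⟩))
      (by
        intro e he
        rw [List.append_nil] at he
        rcases List.mem_map.1 he with ⟨e', he', rfl⟩
        exact pvQue_keys_sub gs gens i0 e'.1 (List.mem_map.2 ⟨e', he', rfl⟩))
      (fun e he => absurd he (List.not_mem_nil))
    exact (((pvRunD_congr gs gens _ _ _ (List.append_nil _).symm _ _).trans
      (hmain.trans (pvRunD_nil gs gens _ _))).symm)
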